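-- pv_equiv track=rewrite | github.com/HectorVarel/quiniela_mundialista_2 | jornadas/views.py | comparar_predicciones
-- ===== SOURCE A (Python) =====
-- def comparar_predicciones(prediccion, resultados):
--     puntos = 0
--     colores = []
--
--     for i in range(len(prediccion)):
--
--         # si aún no hay resultado oficial
--         if resultados[i] == "NA":
--             colores.append("gris")
--             continue
--
--         if prediccion[i] == resultados[i]:
--
--             # asignar puntos según la fase
--             if i == 15:
--                 puntos += 10
--
--             elif i == 14 or i == 16:
--                 puntos += 5
--
--             elif (12 <= i <= 13) or (17 <= i <= 18):
--                 puntos += 3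
--
--             elif (8 <= i <= 11) or (19 <= i <= 22):
--                 puntos += 2
--
--             elif (0 <= i <= 7) or (23 <= i <= 30):
--                 puntos += 1
--
--             colores.append("verde")
--         else:
--             colores.append("rojo")
--
--     return puntos, colores
-- ===== SOURCE B (Python) =====
-- PUNTOS = {15: 10, 14: 5, 16: 5,
--           12: 3, 13: 3, 17: 3, 18: 3,
--           8: 2, 9: 2, 10: 2, 11: 2, 19: 2, 20: 2, 21: 2, 22: 2,
--           0: 1, 1: 1, 2: 1, 3: 1, 4: 1, 5: 1, 6: 1, 7: 1,
--           23: 1, 24: 1, 25: 1, 26: 1, 27: 1, 28: 1, 29: 1, 30: 1}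
--
--
-- def _color(pred, res):
--     if res == "NA":
--         return "gris"
--     return "verde" if pred == res else "rojo"
--
--
-- def comparar_predicciones(prediccion, resultados):
--     colores = [_color(p, resultados[i]) for i, p in enumerate(prediccion)]
--     puntos = sum(PUNTOS.get(i, 0) for i, c in enumerate(colores) if c == "verde")
--     return puntos, colores
-- ===== Notes on version B (the rewrite author's own statement) =====
-- stated objective: simpler
-- what changed: The if/elif index-range cascade is replaced by a PUNTOS lookup table, and the single stateful loop is split into a color comprehension plus a separate sum over the green indices.
import Mathlib
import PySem

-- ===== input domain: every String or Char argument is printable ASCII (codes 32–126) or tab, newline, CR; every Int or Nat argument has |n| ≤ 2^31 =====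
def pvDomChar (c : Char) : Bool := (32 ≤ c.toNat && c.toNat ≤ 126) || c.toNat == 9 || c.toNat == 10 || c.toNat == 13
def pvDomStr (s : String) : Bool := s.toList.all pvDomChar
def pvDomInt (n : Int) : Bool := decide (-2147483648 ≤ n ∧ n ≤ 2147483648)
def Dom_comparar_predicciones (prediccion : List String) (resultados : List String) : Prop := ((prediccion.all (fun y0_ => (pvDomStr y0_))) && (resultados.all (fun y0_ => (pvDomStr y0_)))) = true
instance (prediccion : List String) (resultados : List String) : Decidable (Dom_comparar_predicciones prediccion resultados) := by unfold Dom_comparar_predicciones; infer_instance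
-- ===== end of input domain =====

-- B replaces A's if/elif index-range point cascade by a PUNTOS lookup table and splits the
-- single stateful loop into a color pass plus a separate sum over the green indices (objective: simpler).

-- ===== PORT A =====
-- loop 'for i in range(len(prediccion))': structural recursion on prediccion carrying the index i
def pvGoA (res : List String) : List String → Nat → Int → List String → Int × List String
  | [], _, puntos, colores => (puntos, colores)
  | p :: rest, i, puntos, colores =>
    let r := PySem.List.pyGetD res ((i : Int)) ""   -- resultados[i]; in range under Pre_
    if r == "NA" then
      pvGoA res rest (i + 1) puntos (colores ++ ["gris"])
    else if p == r then
      pvGoA res rest (i + 1)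
        (puntos +
          (if i = 15 then 10
           else if i = 14 ∨ i = 16 then 5
           else if (12 ≤ i ∧ i ≤ 13) ∨ (17 ≤ i ∧ i ≤ 18) then 3
           else if (8 ≤ i ∧ i ≤ 11) ∨ (19 ≤ i ∧ i ≤ 22) then 2
           else if (0 ≤ i ∧ i ≤ 7) ∨ (23 ≤ i ∧ i ≤ 30) then 1
           else 0))
        (colores ++ ["verde"])
    else
      pvGoA res rest (i + 1) puntos (colores ++ ["rojo"])

def comparar_predicciones (prediccion : List String) (resultados : List String) : Int × List String :=
  pvGoA resultados prediccion 0 0 []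

-- ===== PORT B =====
def pvPUNTOS : PySem.Dict Int Int := PySem.Dict.ofList
  [(15, 10), (14, 5), (16, 5),
   (12, 3), (13, 3), (17, 3), (18, 3),
   (8, 2), (9, 2), (10, 2), (11, 2), (19, 2), (20, 2), (21, 2), (22, 2),
   (0, 1), (1, 1), (2, 1), (3, 1), (4, 1), (5, 1), (6, 1), (7, 1),
   (23, 1), (24, 1), (25, 1), (26, 1), (27, 1), (28, 1), (29, 1), (30, 1)]

def pvColor (pred res : String) : String :=
  if res == "NA" then "gris"
  else if pred == res then "verde" else "rojo"

def comparar_predicciones_alt (prediccion : List String) (resultados : List String) : Int × List String :=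
  let colores := (PySem.List.enumerate prediccion).map
    (fun ip => pvColor ip.2 (PySem.List.pyGetD resultados ip.1 ""))
  let puntos := (PySem.List.enumerate colores).foldl
    (fun s ic => if ic.2 == "verde" then s + PySem.Dict.getD pvPUNTOS ic.1 0 else s) 0
  (puntos, colores)

-- ===== PRECONDITION & SPEC =====
-- A raises IndexError (resultados[i]) when resultados is shorter than prediccion; excluded.
def Pre_comparar_predicciones (prediccion : List String) (resultados : List String) : Prop :=
  prediccion.length ≤ resultados.length
instance (prediccion : List String) (resultados : List String) : Decidable (Pre_comparar_predicciones prediccion resultados) := by unfold Pre_comparar_predicciones; infer_instance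
def pvWitness_comparar_predicciones : List String × List String := (["1-0", "2-2"], ["1-0", "NA"])

def Spec_comparar_predicciones (prediccion : List String) (resultados : List String) (out : Int × List String) : Prop := out = comparar_predicciones_alt prediccion resultados
instance (prediccion : List String) (resultados : List String) (out : Int × List String) : Decidable (Spec_comparar_predicciones prediccion resultados out) := by unfold Spec_comparar_predicciones; infer_instance

-- ===== CLAIM (what is proved, stated in full; the proofs are below) =====
def Claim_equal_comparar_predicciones : Prop := ∀ (prediccion : List String) (resultados : List String), Dom_comparar_predicciones prediccion resultados → Pre_comparar_predicciones prediccion resultados → Spec_comparar_predicciones prediccion resultados (comparar_predicciones prediccion resultados)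

-- ===== LEMMAS AND PROOFS =====

-- the colors of the suffix of prediccion starting at index i
def pvCols (res : List String) : List String → Nat → List String
  | [], _ => []
  | p :: rest, i => pvColor p (PySem.List.pyGetD res ((i : Int)) "") :: pvCols res rest (i + 1)

-- the points contributed by a color list whose first element has index s
def pvPts : List String → Nat → Int
  | [], _ => 0
  | c :: rest, s => (if c == "verde" then PySem.Dict.getD pvPUNTOS ((s : Int)) 0 else 0) + pvPts rest (s + 1)

theorem pvChain_eq (i : Nat) :
    (if i = 15 then (10 : Int)
     else if i = 14 ∨ i = 16 then 5
     else if (12 ≤ i ∧ i ≤ 13) ∨ (17 ≤ i ∧ i ≤ 18) then 3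
     else if (8 ≤ i ∧ i ≤ 11) ∨ (19 ≤ i ∧ i ≤ 22) then 2
     else if (0 ≤ i ∧ i ≤ 7) ∨ (23 ≤ i ∧ i ≤ 30) then 1
     else 0) = PySem.Dict.getD pvPUNTOS ((i : Int)) 0 := by
  by_cases h : i ≤ 30
  · interval_cases i <;> decide
  · have h31 : 31 ≤ i := by omega
    have hb : ∀ x ∈ pvPUNTOS.items, x.1 ≤ 30 := by decide
    have hnone : pvPUNTOS.items.find? (fun p => p.1 == (i : Int)) = none := by
      rw [List.find?_eq_none]
      intro x hx
      have := hb x hx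
      simp only [beq_iff_eq]
      omega
    rw [if_neg (by omega), if_neg (by omega), if_neg (by omega), if_neg (by omega), if_neg (by omega)]
    simp [PySem.Dict.getD, PySem.Dict.get?, hnone]

theorem pvGoA_eq (res : List String) :
    ∀ (rest : List String) (i : Nat) (puntos : Int) (colores : List String),
      pvGoA res rest i puntos colores = (puntos + pvPts (pvCols res rest i) i, colores ++ pvCols res rest i) := by
  intro rest
  induction rest with
  | nil => intro i puntos colores; simp [pvGoA, pvCols, pvPts]
  | cons p rest ih =>
    intro i puntos colores
    simp only [pvGoA, pvCols, pvColor, pvPts, ih, pvChain_eq]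
    split_ifs <;> rw [Prod.ext_iff] <;> constructor <;> simp_all <;> try ring

theorem pvMapEnum_eq (res : List String) :
    ∀ (pred : List String) (s : Nat),
      (PySem.List.enumerate pred ((s : Int))).map
        (fun ip => pvColor ip.2 (PySem.List.pyGetD res ip.1 "")) = pvCols res pred s := by
  intro pred
  induction pred with
  | nil => intro s; simp [PySem.List.enumerate_nil, pvCols]
  | cons p rest ih =>
    intro s
    rw [PySem.List.enumerate_cons]
    simp only [List.map_cons, pvCols]
    have : ((s : Int)) + 1 = ((s + 1 : Nat) : Int) := by omega
    rw [this, ih]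

theorem pvFoldEnum_eq :
    ∀ (cols : List String) (s : Nat) (acc : Int),
      (PySem.List.enumerate cols ((s : Int))).foldl
        (fun a ic => if ic.2 == "verde" then a + PySem.Dict.getD pvPUNTOS ic.1 0 else a) acc
        = acc + pvPts cols s := by
  intro cols
  induction cols with
  | nil => intro s acc; simp [PySem.List.enumerate_nil, pvPts]
  | cons c rest ih =>
    intro s acc
    rw [PySem.List.enumerate_cons]
    simp only [List.foldl_cons, pvPts]
    have hs : (s : Int) + 1 = ((s + 1 : Nat) : Int) := by push_cast; ring
    rw [hs, ih]
    by_cases hc : c == "verde"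
    · simp [hc]; ring
    · simp [hc]

-- ===== VERDICT (by name: the statement is the Claim_ definition above) =====
theorem comparar_predicciones_spec : Claim_equal_comparar_predicciones := by
  intro pred res _ _
  unfold Spec_comparar_predicciones comparar_predicciones comparar_predicciones_alt
  have h1 := pvMapEnum_eq res pred 0
  have h2 := pvFoldEnum_eq (pvCols res pred 0) 0 0
  simp only [Nat.cast_zero] at h1 h2
  rw [pvGoA_eq res pred 0 0 []]
  simp only [h1, h2]
  simp
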